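-- pv_equiv track=rewrite | github.com/TheAlgorithms/Python | add_largest_power_of_2_less_than_or_equal_to_a_given_number.py | add_largest
-- ===== SOURCE A (Python) =====
-- def add_largest(num: int) -> int:
--     """
--     Add Largest Power of 2 less then or equal to a given number
--     >>> add_largest(5.3)
--     Traceback (most recent call last):
--         ...
--     TypeError: num must be an integer !!
--     >>> add_largest(5)
--     9
--     >>> add_largest(10)
--     18
--     >>> add_largest(99)
--     163
--     >>> add_largest(-10)
--     0
--     >>> add_largest(999)
--     1511
--
--     """
--
--     """Checks if Float or not"""
--     if isinstance(num, float):
--         raise TypeError("num must be an integer !!")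
--     """Checks if negative or Zero"""
--     if num <= 0:
--         return 0
--     res = 1
--     """Left Bit Shift till it res is less than or equal to the given number"""
--     while (res << 1) <= num:
--         res <<= 1
--
--     """Return the Final Result"""
--     return res + num
-- ===== SOURCE B (Python) =====
-- def add_largest(num: int) -> int:
--     if isinstance(num, float):
--         raise TypeError("num must be an integer !!")
--     if num <= 0:
--         return 0
--     return num + (1 << (num.bit_length() - 1))
-- ===== Notes on version B (the rewrite author's own statement) =====
-- stated objective: idiomatic
-- what changed: The doubling while-loop is replaced by the closed form 1 << (num.bit_length() - 1): the largest power of two is read off the bit width, no loop or mutable accumulator remains.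
import Mathlib
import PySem

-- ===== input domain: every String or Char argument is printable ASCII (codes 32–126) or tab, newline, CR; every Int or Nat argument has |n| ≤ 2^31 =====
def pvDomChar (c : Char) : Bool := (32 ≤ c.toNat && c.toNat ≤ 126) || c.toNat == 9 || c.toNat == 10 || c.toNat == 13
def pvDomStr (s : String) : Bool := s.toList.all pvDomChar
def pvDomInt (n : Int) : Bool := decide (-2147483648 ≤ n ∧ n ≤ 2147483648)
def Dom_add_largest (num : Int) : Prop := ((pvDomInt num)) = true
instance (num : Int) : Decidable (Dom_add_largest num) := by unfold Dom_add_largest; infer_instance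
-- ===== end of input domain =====

-- ===== PORT A =====
-- loop: `while (res << 1) <= num: res <<= 1` (res << 1 is res * 2); the 0 < res
-- conjunct is a totality guard only (res starts positive and only doubles).
def add_largest.loop (num res : Int) : Int :=
  if h : 0 < res ∧ res * 2 ≤ num then add_largest.loop num (res * 2) else res
termination_by (num - res).toNat
decreasing_by omega

def add_largest (num : Int) : Int :=
  if num ≤ 0 then 0 else add_largest.loop num 1 + num

-- ===== PORT B =====
-- B: num + (1 << (num.bit_length() - 1)); for num > 0, bit_length() - 1 = Nat.log2.
def add_largest_alt (num : Int) : Int :=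
  if num ≤ 0 then 0 else num + 2 ^ num.toNat.log2

-- ===== PRECONDITION & SPEC =====
def Spec_add_largest (num : Int) (out : Int) : Prop := out = add_largest_alt num
instance (num : Int) (out : Int) : Decidable (Spec_add_largest num out) := by unfold Spec_add_largest; infer_instance

-- ===== CLAIM (what is proved, stated in full; the proofs are below) =====
def Claim_equal_add_largest : Prop := ∀ (num : Int), Dom_add_largest num → Spec_add_largest num (add_largest num)

-- ===== LEMMAS AND PROOFS =====
lemma add_largest_loop_spec : ∀ (num res : Int), 0 < res → res ≤ num →
    ∃ k : Nat, add_largest.loop num res = res * 2 ^ k ∧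
      res * 2 ^ k ≤ num ∧ num < res * 2 ^ (k + 1) := by
  intro num res
  fun_induction add_largest.loop num res with
  | case1 res h ih =>
    intro hr hle
    obtain ⟨k, h1, h2, h3⟩ := ih (by omega) (by omega)
    refine ⟨k + 1, by rw [h1]; ring, by rw [show res * 2 ^ (k+1) = res * 2 * 2 ^ k by ring]; exact h2, ?_⟩
    calc num < res * 2 * 2 ^ (k + 1) := h3
      _ = res * 2 ^ (k + 1 + 1) := by ring
  | case2 res h =>
    intro hr hle
    refine ⟨0, by simp, by simpa using hle, ?_⟩
    have : ¬ res * 2 ≤ num := by tauto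
    have : res * 2 ^ (0 + 1) = res * 2 := by ring
    omega

-- ===== VERDICT (by name: the statement is the Claim_ definition above) =====
theorem add_largest_spec : Claim_equal_add_largest := by
  intro num _
  unfold Spec_add_largest add_largest add_largest_alt
  by_cases hn : num ≤ 0
  · simp [hn]
  · simp only [hn, if_false]
    obtain ⟨k, h1, h2, h3⟩ := add_largest_loop_spec num 1 one_pos (by omega)
    simp only [one_mul] at h1 h2 h3
    have hcast : ((2 ^ k : Nat) : Int) = 2 ^ k := by push_cast; ring
    have hnum : (num.toNat : Int) = num := Int.toNat_of_nonneg (by omega)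
    have hk : num.toNat.log2 = k := by
      rw [Nat.log2_eq_log_two]
      refine Nat.log_eq_of_pow_le_of_lt_pow ?_ ?_
      · omega
      · have : ((2 ^ (k+1) : Nat) : Int) = 2 ^ (k+1) := by push_cast; ring
        omega
    rw [h1, hk]
    ring
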